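-- pv_equiv track=rewrite | github.com/kckevinchen/RTS-SQL | src/schema_utils.py | extract_column_from_text
-- ===== SOURCE A (Python) =====
-- def extract_column_from_text(text):
--     table_header = ""
--     column_dict = {}
--     found_header = False
--     cur = []
--     for i in text.split("\n"):
--         if(i.startswith("/*")):
--             cur.append(i)
--         elif(i.startswith(");")):
--             break
--         else:
--             cur.append(i)
--             if(found_header):
--                 column_name = " ".join(i.split()[:-1])
--                 column_dict[column_name.lower()] = "\n".join(cur)
--             else:
--                 table_header = "\n".join(cur)
--                 found_header = True
--             cur = []
--     return table_header, column_dict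
-- ===== SOURCE B (Python) =====
-- def extract_column_from_text(text):
--     # pass 1: segment the lines into blocks: a run of comment lines plus one content line
--     blocks = []
--     pending = []
--     for line in text.split("\n"):
--         if line.startswith("/*"):
--             pending.append(line)
--         elif line.startswith(");"):
--             break
--         else:
--             pending.append(line)
--             blocks.append(pending)
--             pending = []
--     if not blocks:
--         return "", {}
--     # pass 2: first block is the header; each other block maps key -> joined block
--     table_header = "\n".join(blocks[0])
--     column_dict = {}
--     for block in blocks[1:]:
--         key = " ".join(block[-1].split()[:-1]).lower()
--         column_dict[key] = "\n".join(block)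
--     return table_header, column_dict
-- ===== Notes on version B (the rewrite author's own statement) =====
-- stated objective: simpler
-- what changed: Replaces A's flag-driven single loop that interleaves grouping with header/dict updates by a two-pass decomposition: first segment the lines into blocks (a run of '/*' comment lines plus one content line, stopping at ');' and dropping a trailing comment-only run), then map the first block to the header and each remaining block to a key computed from its last line.
import Mathlib
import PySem

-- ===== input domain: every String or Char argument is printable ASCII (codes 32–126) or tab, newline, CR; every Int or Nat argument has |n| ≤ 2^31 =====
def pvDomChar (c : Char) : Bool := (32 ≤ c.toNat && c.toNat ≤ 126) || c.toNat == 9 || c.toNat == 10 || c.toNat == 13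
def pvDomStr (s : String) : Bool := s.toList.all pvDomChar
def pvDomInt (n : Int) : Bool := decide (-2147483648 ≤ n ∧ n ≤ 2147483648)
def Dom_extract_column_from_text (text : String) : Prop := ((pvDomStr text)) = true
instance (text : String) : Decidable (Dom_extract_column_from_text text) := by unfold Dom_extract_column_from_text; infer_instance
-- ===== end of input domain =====

-- B replaces A's flag-driven interleaved loop with a two-pass decomposition
-- (segment the lines into blocks, then map blocks to header/dict); objective: simpler, same cost.

-- ===== PORT A =====
-- the for-loop of A: state (table_header, column_dict, found_header, cur); break on ");" returns the pair
def extractALoop : List String → String → PySem.Dict String String → Bool → List String →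
    String × PySem.Dict String String
  | [], th, d, _, _ => (th, d)
  | i :: rest, th, d, fh, cur =>
    if PySem.Str.startswith i "/*" then
      extractALoop rest th d fh (cur ++ [i])
    else if PySem.Str.startswith i ");" then
      (th, d)
    else
      let cur' := cur ++ [i]
      if fh then
        -- " ".join(i.split()[:-1]); xs[:-1] on a list is dropLast (exact, also for [])
        let column_name := PySem.Str.join " " ((PySem.Str.split₀ i).dropLast)
        extractALoop rest th (d.insert (PySem.Str.lower column_name) (PySem.Str.join "\n" cur')) fh []
      else
        extractALoop rest (PySem.Str.join "\n" cur') d true []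

def extract_column_from_text (text : String) : String × (List (String × String)) :=
  let r := extractALoop ((PySem.Str.split? text "\n").getD []) "" PySem.Dict.empty false []
  (r.1, r.2.items)

-- ===== PORT B =====
-- pass 1: segment into blocks (each = comment run ++ one content line); drop trailing comments
def blocksOf : List String → List String → List (List String)
  | [], _ => []
  | l :: rest, pending =>
    if PySem.Str.startswith l "/*" then
      blocksOf rest (pending ++ [l])
    else if PySem.Str.startswith l ");" then
      []
    else
      (pending ++ [l]) :: blocksOf rest []

-- block[-1] (blocks are built nonempty, so the none branch is unreachable)
def lastLine (b : List String) : String :=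
  match PySem.List.pyGet? b (-1) with
  | some l => l
  | none => ""

def keyOf (b : List String) : String :=
  PySem.Str.lower (PySem.Str.join " " ((PySem.Str.split₀ (lastLine b)).dropLast))

def extract_column_from_text_alt (text : String) : String × (List (String × String)) :=
  match blocksOf ((PySem.Str.split? text "\n").getD []) [] with
  | [] => ("", [])
  | b0 :: rest =>
    (PySem.Str.join "\n" b0,
     (rest.foldl (fun d b => d.insert (keyOf b) (PySem.Str.join "\n" b)) PySem.Dict.empty).items)

-- ===== PRECONDITION & SPEC =====
def Spec_extract_column_from_text (text : String) (out : String × (List (String × String))) : Prop := out = extract_column_from_text_alt text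
instance (text : String) (out : String × (List (String × String))) : Decidable (Spec_extract_column_from_text text out) := by unfold Spec_extract_column_from_text; infer_instance

-- ===== CLAIM (what is proved, stated in full; the proofs are below) =====
def Claim_equal_extract_column_from_text : Prop := ∀ (text : String), Dom_extract_column_from_text text → Spec_extract_column_from_text text (extract_column_from_text text)

-- ===== LEMMAS AND PROOFS =====

theorem lastLine_append_singleton (p : List String) (l : String) :
    lastLine (p ++ [l]) = l := by
  simp [lastLine, PySem.List.pyGet?, PySem.List.pyIdx?]

-- invariant once the header has been found: A's remaining loop folds B's blocks into the dict
theorem extractALoop_true (lines : List String) : ∀ (th : String) (d : PySem.Dict String String) (cur : List String),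
    extractALoop lines th d true cur =
      (th, (blocksOf lines cur).foldl
            (fun d b => d.insert (keyOf b) (PySem.Str.join "\n" b)) d) := by
  induction lines with
  | nil => intro th d cur; simp [extractALoop, blocksOf]
  | cons l rest ih =>
    intro th d cur
    by_cases h1 : PySem.Chars.startswith l.toList ['/', '*'] = true
    · simp [extractALoop, blocksOf, h1, ih]
    · by_cases h2 : PySem.Chars.startswith l.toList [')', ';'] = true
      · simp [extractALoop, blocksOf, h1, h2]
      · simp [extractALoop, blocksOf, h1, h2, ih, keyOf, lastLine_append_singleton]

-- before the header: the first block becomes the header, the rest fold into the dict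
theorem extractALoop_false (lines : List String) : ∀ (cur : List String) (d : PySem.Dict String String),
    extractALoop lines "" d false cur =
      (match blocksOf lines cur with
       | [] => ("", d)
       | b0 :: rest =>
         (PySem.Str.join "\n" b0,
          rest.foldl (fun d b => d.insert (keyOf b) (PySem.Str.join "\n" b)) d)) := by
  induction lines with
  | nil => intro cur d; simp [extractALoop, blocksOf]
  | cons l rest ih =>
    intro cur d
    by_cases h1 : PySem.Chars.startswith l.toList ['/', '*'] = true
    · simp [extractALoop, blocksOf, h1, ih]
    · by_cases h2 : PySem.Chars.startswith l.toList [')', ';'] = true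
      · simp [extractALoop, blocksOf, h1, h2]
      · simp [extractALoop, blocksOf, h1, h2, extractALoop_true rest]

-- ===== VERDICT (by name: the statement is the Claim_ definition above) =====
theorem extract_column_from_text_spec : Claim_equal_extract_column_from_text := by
  intro text _
  unfold Spec_extract_column_from_text
  unfold extract_column_from_text extract_column_from_text_alt
  rw [extractALoop_false]
  cases blocksOf ((PySem.Str.split? text "\n").getD []) [] with
  | nil => rfl
  | cons b0 rest => rfl
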